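-- pv_equiv track=rewrite | github.com/BertrandDungan/AdventOfCode | Day8/main.py | westViewLen
-- ===== SOURCE A (Python) =====
-- def westViewLen(
--     forest: list[list[int]], xIndex: int, yIndex: int, treeHeight: int
-- ) -> int:
--     lowerTrees = 0
--     for tree in reversed(forest[yIndex][0:xIndex]):
--         if tree < treeHeight:
--             lowerTrees += 1
--         else:
--             return lowerTrees
--     return lowerTrees
-- ===== SOURCE B (Python) =====
-- def westViewLen(
--     forest: list[list[int]], xIndex: int, yIndex: int, treeHeight: int
-- ) -> int:
--     row = forest[yIndex][0:xIndex]
--     lastBlocker = -1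
--     j = 0
--     for tree in row:
--         if tree >= treeHeight:
--             lastBlocker = j
--         j += 1
--     return j - 1 - lastBlocker
-- ===== Notes on version B (the rewrite author's own statement) =====
-- stated objective: alternative
-- what changed: Replaces A's reversed-slice scan with an early return (count lower trees until the first blocker) by a single forward full pass that records the index of the last blocker and returns len - 1 - lastBlocker by arithmetic.
import Mathlib
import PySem

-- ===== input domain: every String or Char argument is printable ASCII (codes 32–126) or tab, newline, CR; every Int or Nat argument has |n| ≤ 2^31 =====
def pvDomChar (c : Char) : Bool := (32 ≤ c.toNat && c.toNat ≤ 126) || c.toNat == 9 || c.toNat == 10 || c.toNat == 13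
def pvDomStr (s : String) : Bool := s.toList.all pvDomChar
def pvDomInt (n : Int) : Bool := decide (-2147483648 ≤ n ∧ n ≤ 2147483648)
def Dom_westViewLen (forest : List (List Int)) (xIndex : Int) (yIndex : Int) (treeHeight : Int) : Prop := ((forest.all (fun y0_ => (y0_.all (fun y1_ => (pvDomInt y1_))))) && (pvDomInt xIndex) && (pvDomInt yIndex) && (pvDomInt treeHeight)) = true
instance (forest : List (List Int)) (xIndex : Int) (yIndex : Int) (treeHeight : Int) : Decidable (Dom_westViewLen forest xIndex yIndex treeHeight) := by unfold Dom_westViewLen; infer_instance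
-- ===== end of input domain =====

-- B replaces A's reversed scan with early return by one forward pass tracking the
-- last blocker index and a final subtraction (objective: alternative, same cost).

-- ===== PORT A =====
-- the 'for tree in reversed(...)' loop with its early 'return lowerTrees'
def pvALoop (l : List Int) (treeHeight : Int) (lowerTrees : Int) : Int :=
  match l with
  | [] => lowerTrees
  | tree :: rest =>
      if tree < treeHeight then pvALoop rest treeHeight (lowerTrees + 1)
      else lowerTrees

def westViewLen (forest : List (List Int)) (xIndex : Int) (yIndex : Int) (treeHeight : Int) : Int :=
  pvALoop (PySem.List.slice ((PySem.List.pyGet? forest yIndex).getD []) (some 0) (some xIndex)).reverse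
    treeHeight 0

-- ===== PORT B =====
def westViewLen_alt (forest : List (List Int)) (xIndex : Int) (yIndex : Int) (treeHeight : Int) : Int :=
  let row := PySem.List.slice ((PySem.List.pyGet? forest yIndex).getD []) (some 0) (some xIndex)
  let s := row.foldl
    (fun (s : Int × Int) tree => (if tree ≥ treeHeight then s.2 else s.1, s.2 + 1))
    (-1, 0)
  s.2 - 1 - s.1

-- ===== PRECONDITION & SPEC =====
-- Pre_ excludes exactly the inputs where forest[yIndex] raises IndexError in A.
def Pre_westViewLen (forest : List (List Int)) (xIndex : Int) (yIndex : Int) (treeHeight : Int) : Prop :=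
  PySem.Raise.InRange forest.length yIndex
instance (forest : List (List Int)) (xIndex : Int) (yIndex : Int) (treeHeight : Int) : Decidable (Pre_westViewLen forest xIndex yIndex treeHeight) := by unfold Pre_westViewLen; infer_instance
def pvWitness_westViewLen : List (List Int) × Int × Int × Int := ([[3, 1, 2, 4]], 3, 0, 3)

def Spec_westViewLen (forest : List (List Int)) (xIndex : Int) (yIndex : Int) (treeHeight : Int) (out : Int) : Prop := out = westViewLen_alt forest xIndex yIndex treeHeight
instance (forest : List (List Int)) (xIndex : Int) (yIndex : Int) (treeHeight : Int) (out : Int) : Decidable (Spec_westViewLen forest xIndex yIndex treeHeight out) := by unfold Spec_westViewLen; infer_instance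

-- ===== CLAIM (what is proved, stated in full; the proofs are below) =====
def Claim_equal_westViewLen : Prop := ∀ (forest : List (List Int)) (xIndex : Int) (yIndex : Int) (treeHeight : Int), Dom_westViewLen forest xIndex yIndex treeHeight → Pre_westViewLen forest xIndex yIndex treeHeight → Spec_westViewLen forest xIndex yIndex treeHeight (westViewLen forest xIndex yIndex treeHeight)

-- ===== LEMMAS AND PROOFS =====
theorem pvALoop_shift (l : List Int) (h a : Int) :
    pvALoop l h a = a + pvALoop l h 0 := by
  induction l generalizing a with
  | nil => simp [pvALoop]
  | cons t ts ih =>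
      by_cases ht : t < h
      · simp [pvALoop, ht, ih (a + 1), ih 1]; ring
      · simp [pvALoop, ht]

theorem pv_main (l : List Int) (h : Int) :
    pvALoop l.reverse h 0 =
      (l.foldl (fun (s : Int × Int) tree => (if tree ≥ h then s.2 else s.1, s.2 + 1)) (-1, 0)).2
        - 1 -
      (l.foldl (fun (s : Int × Int) tree => (if tree ≥ h then s.2 else s.1, s.2 + 1)) (-1, 0)).1 := by
  induction l using List.reverseRecOn with
  | nil => simp [pvALoop]
  | append_singleton l t ih =>
      rw [List.reverse_append]
      by_cases ht : t < h
      · have hge : ¬ t ≥ h := by omega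
        simp only [List.foldl_append, List.foldl_cons, List.foldl_nil, List.reverse_singleton,
          List.singleton_append, pvALoop, ht, hge, if_true, if_false]
        rw [pvALoop_shift]
        omega
      · have hge : t ≥ h := by omega
        simp only [List.foldl_append, List.foldl_cons, List.foldl_nil, List.reverse_singleton,
          List.singleton_append, pvALoop, ht, hge, if_true, if_false]
        omega

-- ===== VERDICT (by name: the statement is the Claim_ definition above) =====
theorem westViewLen_spec : Claim_equal_westViewLen := by
  intro forest xIndex yIndex treeHeight _ _
  unfold Spec_westViewLen westViewLen westViewLen_alt
  exact pv_main _ _
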